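-- pv_equiv track=rewrite | github.com/chanont60728/EPT-homework | sheet/final/3.3 tri เสร็จแล้ว.py | loveTri
-- ===== SOURCE A (Python) =====
-- def loveTri(n):
--     ans_list = []
--     elements = 1
--     list_previous = [1]
--
--     for i in range(n):
--         sublist_to_answer = [elements]
--
--         for j in range(i):
--             sublist_to_answer.append(elements)
--             sublist_to_answer[-1] = sublist_to_answer[j]+list_previous[j]
--
--         ans_list.append(sublist_to_answer)
--         list_previous = sublist_to_answer
--         elements = list_previous[-1]
--
--     return ans_list
-- ===== SOURCE B (Python) =====
-- def loveTri(n):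
--     # Bell (Aitken) triangle via the closed form
--     #   entry(i, k) = sum_{j=0..k} C(k, j) * bells[i-k+j]
--     # where bells[m] is the first element of row m; no row-to-row
--     # elementwise recurrence is used.
--     rows = []
--     bells = [1]  # bells[m] = first element of row m
--     for i in range(n):
--         row = []
--         pk = [1]  # binomial coefficients C(k, 0..k), updated as a Pascal row
--         for k in range(i + 1):
--             row.append(sum(c * b for c, b in zip(pk, bells[i - k:])))
--             pk = [1] + [pk[t] + pk[t + 1] for t in range(k)] + [1]
--         rows.append(row)
--         bells.append(row[-1])
--     return rows
-- ===== Notes on version B (the rewrite author's own statement) =====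
-- stated objective: alternative
-- what changed: B abandons the row-to-row recurrence entirely: each entry (i,k) is computed directly from the triangle's first column (Bell numbers) by the closed form sum_j C(k,j)*bells[i-k+j], with the binomial coefficients maintained as a Pascal row; A instead derives each row elementwise from the previous row.
import Mathlib
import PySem

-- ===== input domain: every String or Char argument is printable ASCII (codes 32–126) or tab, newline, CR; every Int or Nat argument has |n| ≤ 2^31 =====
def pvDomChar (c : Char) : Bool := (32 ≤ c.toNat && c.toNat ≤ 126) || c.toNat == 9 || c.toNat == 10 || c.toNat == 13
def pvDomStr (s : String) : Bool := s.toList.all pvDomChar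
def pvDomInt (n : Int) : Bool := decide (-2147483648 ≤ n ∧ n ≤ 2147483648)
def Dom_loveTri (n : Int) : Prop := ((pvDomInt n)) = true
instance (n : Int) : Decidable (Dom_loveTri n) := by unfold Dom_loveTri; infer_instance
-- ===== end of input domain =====

-- B computes each triangle entry directly from the first-column (Bell-number) list via
-- binomial coefficients, instead of A's row-to-row elementwise recurrence (alternative algorithm).

-- ===== PORT A =====
-- inner loop: for j in range(i): sublist.append(elements); sublist[-1] = sublist[j] + list_previous[j]
def aInner (elements : Int) (prev : List Int) (i : Int) : List Int :=
  (PySem.List.pyRange 0 i 1).foldl (fun sub j =>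
    let s1 := sub ++ [elements]
    s1.dropLast ++ [(PySem.List.pyGet? s1 j).getD 0 + (PySem.List.pyGet? prev j).getD 0]) [elements]

-- one outer-loop iteration: state = (ans_list, elements, list_previous)
def aStep (st : List (List Int) × Int × List Int) (i : Int) : List (List Int) × Int × List Int :=
  let sub := aInner st.2.1 st.2.2 i
  (st.1 ++ [sub], (PySem.List.pyGet? sub (-1)).getD 0, sub)

def loveTri (n : Int) : List (List Int) :=
  ((PySem.List.pyRange 0 n 1).foldl aStep ([], 1, [1])).1

-- ===== PORT B =====
-- sum(c * b for c, b in zip(pk, bells[i - k:]))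
def bEntry (bells pk : List Int) (i k : Int) : Int :=
  ((pk.zip (PySem.List.slice bells (some (i - k)) none)).map (fun p => p.1 * p.2)).sum

-- pk = [1] + [pk[t] + pk[t + 1] for t in range(k)] + [1]
def bPascalNext (pk : List Int) (k : Int) : List Int :=
  [1] ++ (PySem.List.pyRange 0 k 1).map
    (fun t => PySem.List.pyGetD pk t 0 + PySem.List.pyGetD pk (t + 1) 0) ++ [1]

-- inner loop over k in range(i + 1); state = (row, pk)
def bInner (bells : List Int) (i : Int) : List Int × List Int :=
  (PySem.List.pyRange 0 (i + 1) 1).foldl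
    (fun st k => (st.1 ++ [bEntry bells st.2 i k], bPascalNext st.2 k)) ([], [1])

-- one outer-loop iteration: state = (rows, bells)
def bStep (st : List (List Int) × List Int) (i : Int) : List (List Int) × List Int :=
  let row := (bInner st.2 i).1
  (st.1 ++ [row], st.2 ++ [PySem.List.pyGetD row (-1) 0])

def loveTri_alt (n : Int) : List (List Int) :=
  ((PySem.List.pyRange 0 n 1).foldl bStep ([], [1])).1

-- ===== PRECONDITION & SPEC =====
def Spec_loveTri (n : Int) (out : List (List Int)) : Prop := out = loveTri_alt n
instance (n : Int) (out : List (List Int)) : Decidable (Spec_loveTri n out) := by unfold Spec_loveTri; infer_instance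

-- ===== CLAIM (what is proved, stated in full; the proofs are below) =====
def Claim_equal_loveTri : Prop := ∀ (n : Int), Dom_loveTri n → Spec_loveTri n (loveTri n)

-- ===== LEMMAS AND PROOFS =====

-- prefix sums starting from running total t
def pref : Int → List Int → List Int
  | _, [] => []
  | t, x :: xs => (t + x) :: pref (t + x) xs

-- the mathematical triangle: row i
def T : Nat → List Int
  | 0 => [1]
  | i + 1 => (T i).getLastD 0 :: pref ((T i).getLastD 0) (T i)

-- the first column (Bell numbers)
def bellF (m : Nat) : Int := (T m).getD 0 0

def bellsL (i : Nat) : List Int := (List.range (i + 1)).map bellF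

def chooseRow (k : Nat) : List Int := (List.range (k + 1)).map (fun j => (Nat.choose k j : Int))

def S (k m : Nat) : Int := ∑ j ∈ Finset.range (k + 1), (Nat.choose k j : Int) * bellF (m + j)

theorem pref_length (l : List Int) : ∀ t : Int, (pref t l).length = l.length := by
  induction l with
  | nil => intro t; rfl
  | cons x xs ih => intro t; simp [pref, ih]

theorem pref_append (l : List Int) : ∀ (t x : Int),
    pref t (l ++ [x]) = pref t l ++ [t + l.sum + x] := by
  induction l with
  | nil => intro t x; simp [pref]
  | cons y ys ih =>
      intro t x
      simp [List.cons_append, pref, ih, List.sum_cons, add_assoc]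

theorem pref_getD (l : List Int) : ∀ (t : Int) (k : Nat), k < l.length →
    (pref t l).getD k 0 = (t :: pref t l).getD k 0 + l.getD k 0 := by
  induction l with
  | nil => intro t k h; simp at h
  | cons x xs ih =>
      intro t k h
      cases k with
      | zero => simp [pref]
      | succ k =>
          have hk : k < xs.length := by simpa using h
          simpa [pref] using ih (t + x) k hk

theorem T_length (i : Nat) : (T i).length = i + 1 := by
  induction i with
  | zero => rfl
  | succ i ih => simp [T, pref_length, ih]

theorem T_ne_nil (i : Nat) : T i ≠ [] := by
  intro h
  have := T_length i
  simp [h] at this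

theorem bellF_succ (m : Nat) : bellF (m + 1) = (T m).getLastD 0 := by
  simp [bellF, T]

theorem T_rec (m k : Nat) (hk : k ≤ m) :
    (T (m + 1)).getD (k + 1) 0 = (T (m + 1)).getD k 0 + (T m).getD k 0 := by
  have hlen : k < (T m).length := by rw [T_length]; omega
  have h := pref_getD (T m) ((T m).getLastD 0) k hlen
  show (((T m).getLastD 0) :: pref ((T m).getLastD 0) (T m)).getD (k + 1) 0 = _
  simpa [T] using h

theorem S_eq : ∀ (k m : Nat), S k m = (T (m + k)).getD k 0 := by
  intro k
  induction k with
  | zero => intro m; simp [S, bellF]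
  | succ k ih =>
      intro m
      have h1 : S (k + 1) m
          = (∑ j ∈ Finset.range (k + 1), (Nat.choose (k + 1) (j + 1) : Int) * bellF (m + (j + 1)))
            + (Nat.choose (k + 1) 0 : Int) * bellF (m + 0) := by
        simpa [S] using
          Finset.sum_range_succ' (fun j => (Nat.choose (k + 1) j : Int) * bellF (m + j)) (k + 1)
      have h2 : ∀ j, (Nat.choose (k + 1) (j + 1) : Int) * bellF (m + (j + 1))
          = (Nat.choose k j : Int) * bellF ((m + 1) + j)
            + (Nat.choose k (j + 1) : Int) * bellF (m + (j + 1)) := by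
        intro j
        have : m + (j + 1) = (m + 1) + j := by omega
        rw [Nat.choose_succ_succ]
        push_cast
        rw [add_mul, this]
      have h3 : (∑ j ∈ Finset.range (k + 1), (Nat.choose k (j + 1) : Int) * bellF (m + (j + 1)))
            + (Nat.choose k 0 : Int) * bellF (m + 0) = S k m + (Nat.choose k (k + 1) : Int) * bellF (m + (k + 1)) := by
        have := Finset.sum_range_succ' (fun j => (Nat.choose k j : Int) * bellF (m + j)) (k + 1)
        have h4 := Finset.sum_range_succ (fun j => (Nat.choose k j : Int) * bellF (m + j)) (k + 1)
        calc (∑ j ∈ Finset.range (k + 1), (Nat.choose k (j + 1) : Int) * bellF (m + (j + 1)))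
              + (Nat.choose k 0 : Int) * bellF (m + 0)
            = ∑ j ∈ Finset.range (k + 2), (Nat.choose k j : Int) * bellF (m + j) := this.symm
          _ = S k m + (Nat.choose k (k + 1) : Int) * bellF (m + (k + 1)) := by
              simpa [S] using h4
      have h5 : (Nat.choose k (k + 1) : Int) = 0 := by
        simp [Nat.choose_succ_self]
      calc S (k + 1) m
          = (∑ j ∈ Finset.range (k + 1), ((Nat.choose k j : Int) * bellF ((m + 1) + j)
              + (Nat.choose k (j + 1) : Int) * bellF (m + (j + 1))))
            + (Nat.choose (k + 1) 0 : Int) * bellF (m + 0) := by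
            rw [h1]; congr 1; exact Finset.sum_congr rfl (fun j _ => h2 j)
        _ = S k (m + 1)
            + ((∑ j ∈ Finset.range (k + 1), (Nat.choose k (j + 1) : Int) * bellF (m + (j + 1)))
               + (Nat.choose k 0 : Int) * bellF (m + 0)) := by
            rw [Finset.sum_add_distrib]; simp [S]; ring
        _ = S k (m + 1) + S k m := by rw [h3, h5]; ring
        _ = (T ((m + 1) + k)).getD k 0 + (T (m + k)).getD k 0 := by rw [ih, ih]
        _ = (T ((m + k) + 1)).getD (k + 1) 0 := by
            rw [show (m + 1) + k = (m + k) + 1 from by omega, T_rec (m + k) k (by omega)]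
        _ = (T (m + (k + 1))).getD (k + 1) 0 := by
            rw [show (m + k) + 1 = m + (k + 1) from by omega]

theorem getD_chooseRow (k j : Nat) (hj : j < k + 1) :
    (chooseRow k).getD j 0 = (Nat.choose k j : Int) := by
  simp [chooseRow, List.getD_eq_getElem?_getD, List.getElem?_map,
    List.getElem?_range hj]

theorem bPascalNext_eq (k : Nat) :
    bPascalNext (chooseRow k) (k : Int) = chooseRow (k + 1) := by
  rw [bPascalNext, PySem.List.pyRange_zero_natCast k, List.map_map]
  have hmap : ∀ j ∈ List.range k,
      ((fun t => PySem.List.pyGetD (chooseRow k) t 0 + PySem.List.pyGetD (chooseRow k) (t + 1) 0)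
        ∘ (fun j : Nat => (j : Int))) j
      = (fun j : Nat => (Nat.choose (k + 1) (j + 1) : Int)) j := by
    intro j hj
    have hj' : j < k := List.mem_range.mp hj
    have hc : ((j : Int) + 1) = ((j + 1 : Nat) : Int) := by push_cast; ring
    simp only [Function.comp, hc, PySem.List.pyGetD_natCast]
    rw [show (chooseRow k).getD j 0 = (chooseRow k).getD j 0 from rfl]
    rw [getD_chooseRow k j (by omega), getD_chooseRow k (j + 1) (by omega),
      Nat.choose_succ_succ]
    push_cast
    ring
  rw [List.map_congr_left hmap]
  have : chooseRow (k + 1)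
      = (Nat.choose (k + 1) 0 : Int) :: ((List.range k).map (fun j => (Nat.choose (k + 1) (j + 1) : Int))
          ++ [(Nat.choose (k + 1) (k + 1) : Int)]) := by
    rw [chooseRow, List.range_succ_eq_map, List.map_cons, List.map_map, List.range_succ, List.map_append]
    rfl
  rw [this]
  simp

theorem bellsL_drop (i k : Nat) (hk : k ≤ i) :
    (bellsL i).drop (i - k) = (List.range (k + 1)).map (fun j => bellF (i - k + j)) := by
  rw [bellsL, ← List.map_drop]
  rw [List.range_eq_range', List.drop_range']
  rw [show i + 1 - (i - k) = k + 1 by omega, List.range'_eq_map_range]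
  simp [List.map_map, Function.comp]

theorem bEntry_eq (i k : Nat) (hk : k ≤ i) :
    bEntry (bellsL i) (chooseRow k) (i : Int) (k : Int) = (T i).getD k 0 := by
  have hik : (i : Int) - (k : Int) = ((i - k : Nat) : Int) := by omega
  rw [bEntry, hik, PySem.List.slice_from_natCast, bellsL_drop i k hk]
  rw [chooseRow, List.zip_map']
  rw [List.map_map]
  have h0 : (List.map ((fun p : Int × Int => p.1 * p.2) ∘ fun a => ((Nat.choose k a : Int), bellF (i - k + a)))
      (List.range (k + 1))).sum = S k (i - k) := rfl
  rw [h0, S_eq, show i - k + k = i from by omega]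

theorem map_getD_range (l : List Int) : (List.range l.length).map (fun k => l.getD k 0) = l := by
  apply List.ext_getElem (by simp)
  intro n h1 h2
  simp [List.getD_eq_getElem?_getD, List.getElem?_eq_getElem h2]

-- inner-loop invariant for B
theorem bInner_inv (i : Nat) : ∀ (c : Nat), c ≤ i + 1 →
    (PySem.List.pyRange 0 (c : Int) 1).foldl
      (fun st k => (st.1 ++ [bEntry (bellsL i) st.2 (i : Int) k], bPascalNext st.2 k)) ([], [1])
    = ((List.range c).map (fun k => (T i).getD k 0), chooseRow c) := by
  intro c
  induction c with
  | zero =>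
      intro _
      simp [PySem.List.pyRange_one_eq_nil, chooseRow]
  | succ c ih =>
      intro hc
      have hc' : c ≤ i := by omega
      have hcast : ((c + 1 : Nat) : Int) = (c : Int) + 1 := by push_cast; ring
      have hrange : PySem.List.pyRange 0 ((c : Int) + 1) 1
          = PySem.List.pyRange 0 (c : Int) 1 ++ [(c : Int)] :=
        PySem.List.pyRange_one_succ_right (by omega)
      rw [hcast, hrange, List.foldl_append, ih (by omega)]
      simp only [List.foldl_cons, List.foldl_nil]
      rw [bEntry_eq i c hc', bPascalNext_eq c, List.range_succ, List.map_append]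
      rfl

theorem bRow_eq (i : Nat) : (bInner (bellsL i) (i : Int)).1 = T i := by
  have hcast : ((i : Int) + 1) = ((i + 1 : Nat) : Int) := by push_cast; ring
  rw [bInner, hcast, bInner_inv i (i + 1) (le_refl _)]
  have : (List.range (i + 1)).map (fun k => (T i).getD k 0) = T i := by
    have h := map_getD_range (T i)
    rwa [T_length] at h
  simpa using this

-- outer-loop invariant for B
theorem bOuter_inv : ∀ (c : Nat),
    (PySem.List.pyRange 0 (c : Int) 1).foldl bStep ([], [1])
      = ((List.range c).map T, bellsL c) := by
  intro c
  induction c with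
  | zero =>
      simp [PySem.List.pyRange_one_eq_nil, bellsL]
      rfl
  | succ c ih =>
      have hcast : ((c + 1 : Nat) : Int) = (c : Int) + 1 := by push_cast; ring
      have hrange : PySem.List.pyRange 0 ((c : Int) + 1) 1
          = PySem.List.pyRange 0 (c : Int) 1 ++ [(c : Int)] :=
        PySem.List.pyRange_one_succ_right (by omega)
      rw [hcast, hrange, List.foldl_append, ih]
      simp only [List.foldl_cons, List.foldl_nil, bStep]
      rw [bRow_eq c]
      have h1 : List.map T (List.range c) ++ [T c] = List.map T (List.range (c + 1)) := by
        rw [List.range_succ, List.map_append]; rfl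
      have hx : (T c).getLast (T_ne_nil c) = bellF (c + 1) := by
        rw [bellF_succ, List.getLastD_eq_getLast?, List.getLast?_eq_some_getLast (T_ne_nil c)]
        rfl
      have h2 : bellsL c ++ [PySem.List.pyGetD (T c) (-1) 0] = bellsL (c + 1) := by
        rw [PySem.List.pyGetD_neg_one (T c) 0 (T_ne_nil c), hx]
        simp [bellsL, List.range_succ]
      rw [h1, h2]

-- characterisation of A's inner loop (row from previous row)
theorem pref_last (l : List Int) : ∀ t : Int,
    (t :: pref t l)[l.length]? = some (t + l.sum) := by
  induction l with
  | nil => intro t; simp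
  | cons x xs ih =>
      intro t
      simpa [pref, add_assoc] using ih (t + x)

theorem aInner_eq (p : List Int) (e : Int) : ∀ m : Nat, m ≤ p.length →
    aInner e p (m : Int) = e :: pref e (p.take m) := by
  intro m
  induction m with
  | zero => intro _; simp [aInner, PySem.List.pyRange_one_eq_nil, pref]
  | succ m ih =>
      intro hm
      have hm' : m ≤ p.length := Nat.le_of_succ_le hm
      have hmlt : m < p.length := hm
      have hrange : PySem.List.pyRange 0 ((m : Int) + 1) 1
          = PySem.List.pyRange 0 (m : Int) 1 ++ [(m : Int)] :=
        PySem.List.pyRange_one_succ_right (by omega)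
      have hcast : ((m + 1 : Nat) : Int) = (m : Int) + 1 := by push_cast; ring
      unfold aInner
      rw [hcast, hrange, List.foldl_append]
      have ihe : aInner e p (m : Int) = e :: pref e (p.take m) := ih hm'
      unfold aInner at ihe
      rw [ihe]
      simp only [List.foldl_cons, List.foldl_nil]
      have hget1 : PySem.List.pyGet? ((e :: pref e (p.take m)) ++ [e]) (m : Int)
          = some (e + (p.take m).sum) := by
        rw [PySem.List.pyGet?_natCast]
        rw [List.getElem?_append_left (by simp [pref_length, List.length_take]; omega)]
        have := pref_last (p.take m) e
        rwa [List.length_take, Nat.min_eq_left hm'] at this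
      have hget2 : PySem.List.pyGet? p (m : Int) = some p[m] := by
        rw [PySem.List.pyGet?_natCast]
        exact List.getElem?_eq_getElem hmlt
      rw [hget1, hget2]
      rw [show (e :: pref e (p.take m)) ++ [e] = e :: (pref e (p.take m) ++ [e]) from rfl]
      rw [show e :: (pref e (p.take m) ++ [e]) = (e :: pref e (p.take m)) ++ [e] from rfl,
        List.dropLast_concat]
      have htake : p.take (m + 1) = p.take m ++ [p[m]] := by
        rw [List.take_add_one, List.getElem?_eq_getElem hmlt]
        rfl
      rw [htake, pref_append]
      simp [Option.getD]

-- outer-loop invariant for A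
theorem aOuter_inv : ∀ (c : Nat), 1 ≤ c →
    (PySem.List.pyRange 0 (c : Int) 1).foldl aStep ([], 1, [1])
      = ((List.range c).map T, bellF c, T (c - 1)) := by
  intro c
  induction c with
  | zero => omega
  | succ c ih =>
      intro _
      by_cases h1 : c = 0
      · subst h1
        show (PySem.List.pyRange 0 ((1 : Nat) : Int) 1).foldl aStep ([], 1, [1]) = _
        have : bellF 1 = 1 := by decide
        rw [this]
        decide
      · have hc1 : 1 ≤ c := by omega
        have hcast : ((c + 1 : Nat) : Int) = (c : Int) + 1 := by push_cast; ring
        have hrange : PySem.List.pyRange 0 ((c : Int) + 1) 1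
            = PySem.List.pyRange 0 (c : Int) 1 ++ [(c : Int)] :=
          PySem.List.pyRange_one_succ_right (by omega)
        rw [hcast, hrange, List.foldl_append, ih hc1]
        simp only [List.foldl_cons, List.foldl_nil, aStep]
        obtain ⟨c', rfl⟩ : ∃ c', c = c' + 1 := ⟨c - 1, by omega⟩
        have htake : (T c').take (c' + 1) = T c' := by
          conv_lhs => rw [← T_length c']
          exact List.take_length
        have hsub : aInner (bellF (c' + 1)) (T (c' + 1 - 1)) ((c' + 1 : Nat) : Int) = T (c' + 1) := by
          have h := aInner_eq (T c') (bellF (c' + 1)) (c' + 1) (by rw [T_length])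
          rw [show c' + 1 - 1 = c' from rfl, h, htake, bellF_succ]
          simp [T]
        rw [hsub]
        have hrows : List.map T (List.range (c' + 1)) ++ [T (c' + 1)]
            = List.map T (List.range (c' + 1 + 1)) := by
          simp [List.range_succ]
        have he : (PySem.List.pyGet? (T (c' + 1)) (-1)).getD 0 = bellF (c' + 1 + 1) := by
          rw [PySem.List.pyGet?_neg_one, bellF_succ, List.getLastD_eq_getLast?]
        rw [hrows, he]
        rfl

-- ===== VERDICT (by name: the statement is the Claim_ definition above) =====
theorem loveTri_spec : Claim_equal_loveTri := by
  intro n _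
  unfold Spec_loveTri
  by_cases hn : n ≤ 0
  · have h : PySem.List.pyRange 0 n 1 = [] := PySem.List.pyRange_one_eq_nil hn
    simp [loveTri, loveTri_alt, h]
  · have hpos : 1 ≤ n.toNat := by omega
    have hcast : ((n.toNat : Int)) = n := by omega
    have hA := aOuter_inv n.toNat hpos
    have hB := bOuter_inv n.toNat
    rw [hcast] at hA hB
    simp [loveTri, loveTri_alt, hA, hB]
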